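-- pv_equiv track=rewrite | github.com/zkBlockchain/CODERUN | 336/336.py | counts_remove
-- ===== SOURCE A (Python) =====
-- def counts_remove(blacklist, files, query):
--     deleted_files = {}
--
--     for file in files:
--         if file.startswith(query):
--             if any(file.startswith(dir) for dir in blacklist):
--                 extension = '.' + file.split('.')[-1]
--                 deleted_files[extension] = deleted_files.get(extension, 0) + 1
--
--     return deleted_files
-- ===== SOURCE B (Python) =====
-- def counts_remove(blacklist, files, query):
--     # A file matches some blacklist prefix iff one of its own prefixes of a
--     # blacklisted length is in the set of blacklist entries.
--     bl = set(blacklist)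
--     lengths = {len(d) for d in blacklist}
--     exts = ['.' + f.split('.')[-1]
--             for f in files
--             if f.startswith(query) and any(f[:L] in bl for L in lengths)]
--     counts = {}
--     for e in exts:
--         counts[e] = counts.get(e, 0) + 1
--     return counts
-- ===== Notes on version B (the rewrite author's own statement) =====
-- stated objective: alternative
-- what changed: B replaces A's per-file scan of the blacklist by membership lookups of the file's prefixes (one per distinct blacklist length) in a precomputed hash set of the blacklist, and builds the count dict in a second pass from a filtered list of extensions.
import Mathlib
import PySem

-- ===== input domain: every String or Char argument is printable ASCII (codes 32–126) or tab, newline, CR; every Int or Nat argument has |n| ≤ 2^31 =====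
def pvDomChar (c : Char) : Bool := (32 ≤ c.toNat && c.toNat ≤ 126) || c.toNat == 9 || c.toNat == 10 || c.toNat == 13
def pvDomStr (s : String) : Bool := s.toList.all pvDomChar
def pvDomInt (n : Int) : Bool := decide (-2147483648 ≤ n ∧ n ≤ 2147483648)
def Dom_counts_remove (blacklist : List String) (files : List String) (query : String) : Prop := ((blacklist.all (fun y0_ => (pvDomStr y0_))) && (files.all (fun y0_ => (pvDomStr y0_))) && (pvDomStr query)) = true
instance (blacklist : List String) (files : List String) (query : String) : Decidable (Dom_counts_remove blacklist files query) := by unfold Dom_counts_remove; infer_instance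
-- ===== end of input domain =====

-- B tests each file by looking up its prefixes (one per distinct blacklist
-- length) in a hash set of the blacklist, instead of A's per-file scan of the
-- blacklist; the counts are then built in a second pass over the extensions.

-- ===== PORT A =====
-- '.' + file.split('.')[-1] ; split('.') always returns a nonempty list, so the getD fallbacks are unreachable
def pvExtOf (f : String) : String :=
  "." ++ ((PySem.List.pyGet? ((PySem.Str.split? f ".").getD []) (-1)).getD "")

def counts_remove (blacklist : List String) (files : List String) (query : String) : List (String × Int) :=
  (files.foldl (fun deleted_files file =>
      if PySem.Str.startswith file query then
        if blacklist.any (fun dir => PySem.Str.startswith file dir) then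
          let extension := pvExtOf file
          deleted_files.insert extension (deleted_files.getD extension 0 + 1)
        else deleted_files
      else deleted_files)
    (PySem.Dict.empty : PySem.Dict String Int)).items

-- ===== PORT B =====
def counts_remove_alt (blacklist : List String) (files : List String) (query : String) : List (String × Int) :=
  let bl : PySem.Set String := PySem.Set.ofList blacklist
  let lengths : PySem.Set Int := PySem.Set.ofList (blacklist.map (fun d => PySem.Str.len d))
  let exts : List String :=
    (files.filter (fun f =>
        PySem.Str.startswith f query &&
        lengths.any (fun L => PySem.Set.contains bl (PySem.Str.slice f none (some L))))).map
      (fun f => pvExtOf f)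
  (exts.foldl (fun counts e => counts.insert e (counts.getD e 0 + 1))
    (PySem.Dict.empty : PySem.Dict String Int)).items

-- ===== PRECONDITION & SPEC =====
def Spec_counts_remove (blacklist : List String) (files : List String) (query : String) (out : List (String × Int)) : Prop := out = counts_remove_alt blacklist files query
instance (blacklist : List String) (files : List String) (query : String) (out : List (String × Int)) : Decidable (Spec_counts_remove blacklist files query out) := by unfold Spec_counts_remove; infer_instance

-- ===== CLAIM (what is proved, stated in full; the proofs are below) =====
def Claim_equal_counts_remove : Prop := ∀ (blacklist : List String) (files : List String) (query : String), Dom_counts_remove blacklist files query → Spec_counts_remove blacklist files query (counts_remove blacklist files query)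

-- ===== LEMMAS AND PROOFS =====

-- A's scan of the blacklist equals B's length-indexed set lookups.
theorem pv_cond_eq (blacklist : List String) (f : String) :
    blacklist.any (fun dir => PySem.Str.startswith f dir)
      = (PySem.Set.ofList (blacklist.map (fun d => PySem.Str.len d))).any
          (fun L => PySem.Set.contains (PySem.Set.ofList blacklist) (PySem.Str.slice f none (some L))) := by
  rw [Bool.eq_iff_iff]
  simp only [List.any_eq_true, PySem.Str.startswith_eq, PySem.Chars.startswith_iff,
    PySem.Set.contains, List.contains_eq_mem, decide_eq_true_eq, PySem.Set.mem_ofList,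
    List.mem_map]
  constructor
  · rintro ⟨d, hd, hpre⟩
    refine ⟨PySem.Str.len d, ⟨d, hd, rfl⟩, ?_⟩
    have hlen : PySem.Str.len d = ((d.toList.length : Nat) : Int) := rfl
    have : PySem.Str.slice f none (some (PySem.Str.len d)) = d := by
      apply String.toList_inj.mp
      rw [PySem.Str.toList_slice, hlen, PySem.Chars.slice_eq_listSlice,
        PySem.List.slice_to_natCast]
      exact (List.prefix_iff_eq_take.mp hpre).symm
    rwa [this]
  · rintro ⟨L, ⟨d0, _, rfl⟩, hmem⟩
    refine ⟨PySem.Str.slice f none (some (PySem.Str.len d0)), hmem, ?_⟩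
    have hlen : PySem.Str.len d0 = ((d0.toList.length : Nat) : Int) := rfl
    rw [PySem.Str.toList_slice, hlen, PySem.Chars.slice_eq_listSlice,
      PySem.List.slice_to_natCast]
    exact List.take_prefix _ _

-- a guarded counting fold is the plain counting fold over the filtered, mapped list
theorem pv_fold_filter (c : String → Bool) (k : String → String) :
    ∀ (l : List String) (d : PySem.Dict String Int),
      l.foldl (fun d f => if c f then d.insert (k f) (d.getD (k f) 0 + 1) else d) d
        = ((l.filter c).map k).foldl (fun d e => d.insert e (d.getD e 0 + 1)) d := by
  intro l
  induction l with
  | nil => intro d; rfl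
  | cons f t ih =>
    intro d
    by_cases hf : c f = true
    · simp [List.foldl_cons, hf, ih]
    · simp [List.foldl_cons, Bool.eq_false_iff.mpr hf, ih]

theorem counts_remove_eq (blacklist : List String) (files : List String) (query : String) :
    counts_remove blacklist files query = counts_remove_alt blacklist files query := by
  unfold counts_remove counts_remove_alt
  have hbody : (fun (deleted_files : PySem.Dict String Int) (file : String) =>
      if PySem.Str.startswith file query then
        if blacklist.any (fun dir => PySem.Str.startswith file dir) then
          let extension := pvExtOf file
          deleted_files.insert extension (deleted_files.getD extension 0 + 1)
        else deleted_files
      else deleted_files)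
      = (fun (d : PySem.Dict String Int) (f : String) =>
          if (PySem.Str.startswith f query &&
              (PySem.Set.ofList (blacklist.map (fun d => PySem.Str.len d))).any
                (fun L => PySem.Set.contains (PySem.Set.ofList blacklist)
                  (PySem.Str.slice f none (some L)))) then
            d.insert (pvExtOf f) (d.getD (pvExtOf f) 0 + 1)
          else d) := by
    funext d f
    rw [← pv_cond_eq]
    cases h1 : PySem.Str.startswith f query <;>
      cases h2 : blacklist.any (fun dir => PySem.Str.startswith f dir) <;> simp
  rw [hbody, pv_fold_filter]

-- ===== VERDICT (by name: the statement is the Claim_ definition above) =====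
theorem counts_remove_spec : Claim_equal_counts_remove := by
  intro blacklist files query _
  unfold Spec_counts_remove
  exact counts_remove_eq blacklist files query
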